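-- pv_equiv track=rewrite | github.com/QuentinNo07/Code-France-IOI | code_python/niveau_4/3 – Structures de données et Balayages/Fermeture annuelle.py | longest_inactive_period
-- ===== SOURCE A (Python) =====
-- def longest_inactive_period(periode, festivals):
--     max_inactive = 0
--     last_end = 0
--     for start, end in festivals :
--         if last_end < start:
--             max_inactive = max(max_inactive, start - last_end)
--         last_end = max(last_end, end)
--     max_inactive = max(max_inactive, periode - last_end + festivals [0][0])
--     return max_inactive
-- ===== SOURCE B (Python) =====
-- def longest_inactive_period(periode, festivals):
--     # prefix[i] = max end time among festivals[0..i-1], seeded at 0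
--     prefix = [0]
--     for _, end in festivals:
--         prefix.append(max(prefix[-1], end))
--     gaps = [start - p for (start, _), p in zip(festivals, prefix)]
--     return max([0, periode - prefix[-1] + festivals[0][0]] + gaps)
-- ===== Notes on version B (the rewrite author's own statement) =====
-- stated objective: alternative
-- what changed: Replaces the single stateful sweep (running max-gap and running last_end updated together, with a conditional update) by a two-pass decomposition: first a prefix-maximum table of end times, then an unconditional gap list zipped against it, finished by one max() over the candidates.
import Mathlib
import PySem

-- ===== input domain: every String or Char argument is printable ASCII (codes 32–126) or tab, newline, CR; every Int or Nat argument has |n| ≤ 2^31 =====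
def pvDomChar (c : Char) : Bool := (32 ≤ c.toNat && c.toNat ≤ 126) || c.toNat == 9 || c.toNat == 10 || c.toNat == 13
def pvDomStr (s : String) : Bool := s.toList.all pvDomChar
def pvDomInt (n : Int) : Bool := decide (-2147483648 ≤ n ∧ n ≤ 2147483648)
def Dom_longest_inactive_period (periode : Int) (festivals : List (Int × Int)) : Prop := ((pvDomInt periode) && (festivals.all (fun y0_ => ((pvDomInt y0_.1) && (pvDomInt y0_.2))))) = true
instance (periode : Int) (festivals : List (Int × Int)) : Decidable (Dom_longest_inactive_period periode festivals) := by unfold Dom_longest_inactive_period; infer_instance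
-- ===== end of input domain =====

-- B replaces A's single stateful sweep by a prefix-maximum table plus a zipped gap list and one max(); same O(n) cost, alternative decomposition.


-- ===== PORT A =====
-- the for-loop over (start, end) carrying (max_inactive, last_end)
def pvLoopA (festivals : List (Int × Int)) (st : Int × Int) : Int × Int :=
  festivals.foldl
    (fun acc fe =>
      (if acc.2 < fe.1 then max acc.1 (fe.1 - acc.2) else acc.1, max acc.2 fe.2))
    st

def longest_inactive_period (periode : Int) (festivals : List (Int × Int)) : Int :=
  let st := pvLoopA festivals (0, 0)
  match PySem.List.pyGet? festivals 0 with
  | some f0 => max st.1 (periode - st.2 + f0.1)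
  | none => 0  -- festivals[0] raises IndexError in Python: excluded by Pre_

-- ===== PORT B =====
-- prefix = [0]; for _, end in festivals: prefix.append(max(prefix[-1], end))
def pvBuildPrefix (acc : Int) : List (Int × Int) → List Int
  | [] => [acc]
  | fe :: rest => acc :: pvBuildPrefix (max acc fe.2) rest

def longest_inactive_period_alt (periode : Int) (festivals : List (Int × Int)) : Int :=
  let pfx := pvBuildPrefix 0 festivals
  let gaps := (festivals.zip pfx).map (fun p => p.1.1 - p.2)
  match PySem.List.pyGet? festivals 0 with
  | some f0 =>
      (PySem.List.max? (0 :: (periode - (pfx.getLast?.getD 0) + f0.1) :: gaps)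
        (fun y => y)).getD 0
  | none => 0  -- festivals[0][0] raises IndexError in Python: excluded by Pre_

-- ===== PRECONDITION & SPEC =====
-- both A and B index festivals[0], which raises IndexError on the empty list
def Pre_longest_inactive_period (periode : Int) (festivals : List (Int × Int)) : Prop := festivals ≠ []
instance (periode : Int) (festivals : List (Int × Int)) : Decidable (Pre_longest_inactive_period periode festivals) := by unfold Pre_longest_inactive_period; infer_instance
def pvWitness_longest_inactive_period : Int × (List (Int × Int)) := (30, [(5, 10), (12, 20)])

def Spec_longest_inactive_period (periode : Int) (festivals : List (Int × Int)) (out : Int) : Prop := out = longest_inactive_period_alt periode festivals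
instance (periode : Int) (festivals : List (Int × Int)) (out : Int) : Decidable (Spec_longest_inactive_period periode festivals out) := by unfold Spec_longest_inactive_period; infer_instance

-- ===== CLAIM (what is proved, stated in full; the proofs are below) =====
def Claim_equal_longest_inactive_period : Prop := ∀ (periode : Int) (festivals : List (Int × Int)), Dom_longest_inactive_period periode festivals → Pre_longest_inactive_period periode festivals → Spec_longest_inactive_period periode festivals (longest_inactive_period periode festivals)

-- ===== LEMMAS AND PROOFS =====

-- getLast? skips the head of a nonempty tail
lemma getLast?_cons_of_ne_nil {l : List Int} (a : Int) (h : l ≠ []) :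
    (a :: l).getLast? = l.getLast? := by
  cases l with
  | nil => exact absurd rfl h
  | cons b t => simp [List.getLast?]

-- shifting an initial max out of a running max fold
lemma foldl_max_max (l : List Int) : ∀ (a b : Int),
    l.foldl max (max a b) = max a (l.foldl max b) := by
  induction l with
  | nil => intro a b; simp
  | cons x t ih =>
      intro a b
      simp only [List.foldl_cons]
      rw [max_assoc, ih]

-- last element of the prefix table = running max of end times
lemma pvBuildPrefix_getLast : ∀ (fs : List (Int × Int)) (a : Int),
    (pvBuildPrefix a fs).getLast?.getD 0 = fs.foldl (fun le fe => max le fe.2) a := by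
  intro fs
  induction fs with
  | nil => intro a; simp [pvBuildPrefix]
  | cons fe rest ih =>
      intro a
      simp only [pvBuildPrefix, List.foldl_cons]
      rw [getLast?_cons_of_ne_nil a (by cases rest <;> simp [pvBuildPrefix]), ih]

-- second component of A's loop = running max of end times
lemma pvLoopA_snd : ∀ (fs : List (Int × Int)) (mi le : Int),
    (pvLoopA fs (mi, le)).2 = fs.foldl (fun a fe => max a fe.2) le := by
  intro fs
  induction fs with
  | nil => intro mi le; simp [pvLoopA]
  | cons fe rest ih =>
      intro mi le
      simp only [pvLoopA, List.foldl_cons] at *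
      exact ih _ _

-- first component of A's loop = max fold over the zipped gap list (for a nonnegative seed)
lemma pvLoopA_fst : ∀ (fs : List (Int × Int)) (mi le : Int), 0 ≤ mi →
    (pvLoopA fs (mi, le)).1 =
      ((fs.zip (pvBuildPrefix le fs)).map (fun p => p.1.1 - p.2)).foldl max mi := by
  intro fs
  induction fs with
  | nil => intro mi le _; simp [pvLoopA, pvBuildPrefix]
  | cons fe rest ih =>
      intro mi le hmi
      simp only [pvLoopA, pvBuildPrefix, List.zip_cons_cons, List.map_cons,
        List.foldl_cons] at *
      have hstep : (if le < fe.1 then max mi (fe.1 - le) else mi) = max mi (fe.1 - le) := by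
        split
        · rfl
        · omega
      rw [hstep]
      exact ih _ _ (by omega)

-- ===== VERDICT (by name: the statement is the Claim_ definition above) =====
theorem longest_inactive_period_spec : Claim_equal_longest_inactive_period := by
  intro periode festivals _hdom hpre
  unfold Spec_longest_inactive_period longest_inactive_period longest_inactive_period_alt
  cases festivals with
  | nil => exact absurd rfl hpre
  | cons f0 rest =>
      simp only [PySem.List.pyGet?, PySem.List.pyIdx?]
      norm_num
      rw [pvLoopA_fst _ 0 0 le_rfl, pvLoopA_snd, pvBuildPrefix_getLast,
        PySem.List.max?_id_cons]
      simp only [Option.getD_some, List.foldl_cons]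
      rw [max_comm (0:Int), foldl_max_max, max_comm]
      rw [← foldl_max_max, ← foldl_max_max, max_comm]
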